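-- pv_equiv track=rewrite | github.com/TimilsinaBimal/Watchly | app/services/tmdb/service.py | _pick_image_by_language
-- ===== SOURCE A (Python) =====
-- from typing import Any
--
-- def _pick_image_by_language(
--     images_list: list[dict[str, Any]] | None,
--     preferred_lang_codes: list[str | None],
-- ) -> str | None:
--     """
--     Pick best image from list by language preference (same logic as no-stremio-addon).
--     preferred_lang_codes: e.g. ["en", None, "fr"] -> prefer en, then no language, then fr.
--     """
--     if not images_list:
--         return None
--     for lang in preferred_lang_codes:
--         for img in images_list:
--             iso = img.get("iso_639_1")
--             if iso == lang:
--                 path = img.get("file_path")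
--                 if path:
--                     return path
--     return images_list[0].get("file_path") if images_list else None
-- ===== SOURCE B (Python) =====
-- def _pick_image_by_language(images_list, preferred_lang_codes):
--     if not images_list:
--         return None
--     # rank table: each language code -> its first index in the preference list
--     rank = {}
--     for i, lang in enumerate(preferred_lang_codes):
--         rank.setdefault(lang, i)
--     best_rank = None
--     best_path = None
--     # single pass: keep the candidate with the smallest rank (earliest wins ties)
--     for img in images_list:
--         path = img.get("file_path")
--         if not path:
--             continue
--         r = rank.get(img.get("iso_639_1"))
--         if r is None:
--             continue
--         if best_rank is None or r < best_rank:
--             best_rank = r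
--             best_path = path
--         if best_rank == 0:
--             break  # rank 0 is unbeatable
--     if best_path is not None:
--         return best_path
--     return images_list[0].get("file_path")
-- ===== Notes on version B (the rewrite author's own statement) =====
-- stated objective: faster
-- what changed: Replaces A's nested loops (each preferred language rescanned against the whole image list) by a rank dict built once from the preference list plus a single pass over the images tracking the minimum-rank candidate with strictly-smaller updates so the earliest image wins ties.
import Mathlib
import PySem

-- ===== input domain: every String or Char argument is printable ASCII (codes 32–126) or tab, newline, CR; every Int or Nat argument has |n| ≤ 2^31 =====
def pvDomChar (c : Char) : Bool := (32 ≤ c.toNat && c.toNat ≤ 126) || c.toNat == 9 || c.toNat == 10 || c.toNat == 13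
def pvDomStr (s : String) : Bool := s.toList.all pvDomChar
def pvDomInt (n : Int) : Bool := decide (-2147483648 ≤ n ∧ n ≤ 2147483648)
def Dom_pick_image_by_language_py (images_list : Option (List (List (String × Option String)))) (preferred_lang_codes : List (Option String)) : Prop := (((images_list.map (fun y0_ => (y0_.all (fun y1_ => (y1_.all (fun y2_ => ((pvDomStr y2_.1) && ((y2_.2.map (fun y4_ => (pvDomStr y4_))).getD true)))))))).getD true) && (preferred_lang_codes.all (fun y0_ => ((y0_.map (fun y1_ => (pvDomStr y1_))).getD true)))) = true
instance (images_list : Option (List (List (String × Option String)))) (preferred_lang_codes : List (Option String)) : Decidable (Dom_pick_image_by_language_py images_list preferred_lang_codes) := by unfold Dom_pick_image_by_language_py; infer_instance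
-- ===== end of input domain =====

-- B replaces A's nested scan (each preferred language against every image) by a rank
-- table built once plus a single pass over the images keeping the minimum-rank candidate
-- (objective: faster single pass, O(L+N) instead of O(L*N)).

-- shared helper: Python dict.get(k) on an association-list image (first match, default None)
def pvGet (img : List (String × Option String)) (k : String) : Option String :=
  ((PySem.Dict.mk img).get? k).getD none

-- Python truthiness of a str-or-None value
def pvTruthy : Option String → Bool
  | none => false
  | some s => !(s == "")

-- ===== PORT A =====
-- inner loop: for img in images_list: if iso == lang and path truthy: return path
def pvScanA (lang : Option String) : List (List (String × Option String)) → Option String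
  | [] => none
  | img :: rest =>
    let iso := pvGet img "iso_639_1"
    if iso = lang then
      let path := pvGet img "file_path"
      if pvTruthy path then path else pvScanA lang rest
    else pvScanA lang rest

-- outer loop over preferred_lang_codes
def pvLoopA (langs : List (Option String)) (imgs : List (List (String × Option String))) : Option String :=
  match langs with
  | [] => none
  | l :: ls =>
    match pvScanA l imgs with
    | some p => some p
    | none => pvLoopA ls imgs

def pick_image_by_language_py (images_list : Option (List (List (String × Option String)))) (preferred_lang_codes : List (Option String)) : Option String :=
  match images_list with
  | none => none
  | some imgs =>
    match imgs with
    | [] => none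
    | i0 :: _ =>
      match pvLoopA preferred_lang_codes imgs with
      | some p => some p
      | none => pvGet i0 "file_path"

-- ===== PORT B =====
-- rank table: language code -> first index in the preference list (setdefault keeps the first)
def pvRankTable (langs : List (Option String)) : PySem.Dict (Option String) Int :=
  (PySem.List.enumerate langs 0).foldl (fun d li => d.setdefault li.2 li.1) PySem.Dict.empty

-- one step of the single pass: keep the candidate with strictly smaller rank
def pvStepB (rank : PySem.Dict (Option String) Int) (best : Option Int × Option String) (img : List (String × Option String)) : Option Int × Option String :=
  let path := pvGet img "file_path"
  if pvTruthy path = false then best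
  else
    match rank.get? (pvGet img "iso_639_1") with
    | none => best
    | some r =>
      match best.1 with
      | none => (some r, path)
      | some br => if r < br then (some r, path) else best

-- the single pass, stopping early once an unbeatable rank-0 candidate is held
def pvRunB (rank : PySem.Dict (Option String) Int) (best : Option Int × Option String) : List (List (String × Option String)) → Option Int × Option String
  | [] => best
  | img :: t =>
    let b := pvStepB rank best img
    if b.1 = some 0 then b else pvRunB rank b t

def pick_image_by_language_py_alt (images_list : Option (List (List (String × Option String)))) (preferred_lang_codes : List (Option String)) : Option String :=
  match images_list with
  | none => none
  | some imgs =>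
    match imgs with
    | [] => none
    | i0 :: _ =>
      let rank := pvRankTable preferred_lang_codes
      let best := pvRunB rank (none, none) imgs
      match best.2 with
      | some p => some p
      | none => pvGet i0 "file_path"

-- ===== PRECONDITION & SPEC =====
def Spec_pick_image_by_language_py (images_list : Option (List (List (String × Option String)))) (preferred_lang_codes : List (Option String)) (out : Option String) : Prop := out = pick_image_by_language_py_alt images_list preferred_lang_codes
instance (images_list : Option (List (List (String × Option String)))) (preferred_lang_codes : List (Option String)) (out : Option String) : Decidable (Spec_pick_image_by_language_py images_list preferred_lang_codes out) := by unfold Spec_pick_image_by_language_py; infer_instance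

-- ===== CLAIM (what is proved, stated in full; the proofs are below) =====
def Claim_equal_pick_image_by_language_py : Prop := ∀ (images_list : Option (List (List (String × Option String)))) (preferred_lang_codes : List (Option String)), Dom_pick_image_by_language_py images_list preferred_lang_codes → Spec_pick_image_by_language_py images_list preferred_lang_codes (pick_image_by_language_py images_list preferred_lang_codes)

-- ===== LEMMAS AND PROOFS =====

-- first index (as Int) of x in langs
def pvIdx (x : Option String) : List (Option String) → Option Int
  | [] => none
  | l :: ls => if x = l then some 0 else (pvIdx x ls).map (· + 1)

-- candidate of an image: (rank of its language, its truthy path)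
def pvCand (langs : List (Option String)) (img : List (String × Option String)) : Option (Int × String) :=
  match pvGet img "file_path" with
  | none => none
  | some p => if p = "" then none else (pvIdx (pvGet img "iso_639_1") langs).map (fun r => (r, p))

-- left-biased min-by-rank merge
def pvMerge : Option (Int × String) → Option (Int × String) → Option (Int × String)
  | b, none => b
  | none, some c => some c
  | some b, some c => if c.1 < b.1 then some c else some b

def pvMin (langs : List (Option String)) : List (List (String × Option String)) → Option (Int × String)
  | [] => none
  | img :: t => pvMerge (pvCand langs img) (pvMin langs t)

def pvToPair (o : Option (Int × String)) : Option Int × Option String :=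
  (o.map Prod.fst, o.map Prod.snd)

theorem pvMerge_none_left (x : Option (Int × String)) : pvMerge none x = x := by
  cases x <;> rfl

theorem pvMerge_none_right (x : Option (Int × String)) : pvMerge x none = x := by
  cases x <;> rfl

theorem pvMerge_assoc (a b c : Option (Int × String)) :
    pvMerge (pvMerge a b) c = pvMerge a (pvMerge b c) := by
  rcases a with _|a <;> rcases b with _|b <;> rcases c with _|c <;>
    try simp only [pvMerge_none_left, pvMerge_none_right]
  by_cases hab : b.1 < a.1 <;> by_cases hbc : c.1 < b.1 <;> by_cases hac : c.1 < a.1 <;>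
    simp [pvMerge, hab, hbc, hac] <;> exfalso <;> omega

theorem pvTable_gen (langs : List (Option String)) (s : Int) (d : PySem.Dict (Option String) Int) (x : Option String) :
    ((PySem.List.enumerate langs s).foldl (fun d li => d.setdefault li.2 li.1) d).get? x
      = match d.get? x with
        | some v => some v
        | none => (pvIdx x langs).map (fun n => s + n) := by
  induction langs generalizing s d with
  | nil => cases h : d.get? x <;> simp [PySem.List.enumerate_nil, pvIdx, h]
  | cons l ls ih =>
    rw [PySem.List.enumerate_cons]
    simp only [List.foldl_cons]
    rw [ih]
    by_cases hx : x = l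
    · subst hx
      rw [PySem.Dict.get?_setdefault_self d x s]
      cases h : d.get? x with
      | some v => simp
      | none => simp [pvIdx]
    · rw [PySem.Dict.get?_setdefault_of_ne d s hx]
      cases h : d.get? x with
      | some v => simp
      | none =>
        simp only [pvIdx, if_neg hx]
        cases pvIdx x ls <;> simp
        omega

theorem pvTable (langs : List (Option String)) (x : Option String) :
    (pvRankTable langs).get? x = pvIdx x langs := by
  rw [pvRankTable, pvTable_gen]
  simp [PySem.Dict.get?_empty]

theorem pvStep_toPair (langs : List (Option String)) (o : Option (Int × String)) (img : List (String × Option String)) :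
    pvStepB (pvRankTable langs) (pvToPair o) img = pvToPair (pvMerge o (pvCand langs img)) := by
  unfold pvStepB pvCand
  rw [pvTable]
  cases hp : pvGet img "file_path" with
  | none => cases o <;> simp [pvTruthy, pvMerge, pvToPair]
  | some p =>
    by_cases hpe : p = ""
    · cases o <;> simp [pvTruthy, hpe, pvMerge, pvToPair]
    · simp only [pvTruthy, hpe]
      cases hr : pvIdx (pvGet img "iso_639_1") langs with
      | none => cases o <;> simp [pvToPair, pvMerge, hpe]
      | some r =>
        cases o with
        | none => simp [pvToPair, pvMerge, hpe]
        | some b =>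
          simp only [pvToPair, Option.map_some, pvMerge]
          by_cases hlt : r < b.1 <;> simp [hlt, hpe]

theorem pvIdx_nonneg (x : Option String) (langs : List (Option String)) (r : Int)
    (h : pvIdx x langs = some r) : 0 ≤ r := by
  induction langs generalizing r with
  | nil => simp [pvIdx] at h
  | cons l ls ih =>
    simp only [pvIdx] at h
    split_ifs at h with hx
    · simp at h; omega
    · cases hr : pvIdx x ls with
      | none => simp [hr] at h
      | some r' =>
        rw [hr] at h
        simp at h
        have := ih r' hr
        omega

theorem pvCand_nonneg (langs : List (Option String)) (i : List (String × Option String)) (c : Int × String)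
    (hc : pvCand langs i = some c) : 0 ≤ c.1 := by
  cases hp : pvGet i "file_path" with
  | none => simp only [pvCand, hp] at hc; cases hc
  | some q =>
    cases hr : pvIdx (pvGet i "iso_639_1") langs with
    | none => simp [pvCand, hp, hr] at hc
    | some r =>
      simp only [pvCand, hp, hr, Option.map_some] at hc
      by_cases hpe : q = ""
      · simp [hpe] at hc
      · rw [if_neg hpe] at hc
        obtain rfl := Option.some.inj hc
        exact pvIdx_nonneg _ _ _ hr

theorem pvMin_nonneg (langs : List (Option String)) (imgs : List (List (String × Option String))) (c : Int × String)
    (h : pvMin langs imgs = some c) : 0 ≤ c.1 := by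
  induction imgs generalizing c with
  | nil => simp [pvMin] at h
  | cons i t ih =>
    simp only [pvMin] at h
    rcases hm : pvMin langs t with _|m
    · rw [hm, pvMerge_none_right] at h
      exact pvCand_nonneg _ _ _ h
    · rw [hm] at h
      rcases hc : pvCand langs i with _|cc
      · rw [hc, pvMerge_none_left] at h
        obtain rfl := Option.some.inj h
        exact ih _ hm
      · rw [hc] at h
        simp only [pvMerge] at h
        split_ifs at h with hlt
        · obtain rfl := Option.some.inj h
          exact ih _ hm
        · obtain rfl := Option.some.inj h
          exact pvCand_nonneg _ _ _ hc

theorem pvRun_toPair (langs : List (Option String)) (imgs : List (List (String × Option String))) (o : Option (Int × String)) :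
    pvRunB (pvRankTable langs) (pvToPair o) imgs
      = pvToPair (pvMerge o (pvMin langs imgs)) := by
  induction imgs generalizing o with
  | nil => simp only [pvRunB, pvMin, pvMerge_none_right]
  | cons i t ih =>
    simp only [pvRunB, pvStep_toPair, pvMin]
    by_cases h0 : (pvToPair (pvMerge o (pvCand langs i))).1 = some 0
    · rw [if_pos h0]
      obtain ⟨p, hm⟩ : ∃ p, pvMerge o (pvCand langs i) = some (0, p) := by
        rcases hmm : pvMerge o (pvCand langs i) with _|c
        · rw [hmm] at h0; cases h0
        · rcases c with ⟨r, p⟩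
          rw [hmm] at h0
          simp only [pvToPair, Option.map_some] at h0
          obtain rfl := Option.some.inj h0
          exact ⟨p, rfl⟩
      rw [hm, ← pvMerge_assoc, hm]
      rcases hmin : pvMin langs t with _|c
      · rw [pvMerge_none_right]
      · have hn := pvMin_nonneg _ _ _ hmin
        simp only [pvMerge]
        rw [if_neg (by omega)]
    · rw [if_neg h0, ih, ← pvMerge_assoc]

theorem pvMin_nil_langs (imgs : List (List (String × Option String))) : pvMin [] imgs = none := by
  induction imgs with
  | nil => rfl
  | cons i t ih =>
    simp only [pvMin, ih, pvMerge_none_right]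
    cases hp : pvGet i "file_path" with
    | none => simp [pvCand, hp]
    | some q => simp [pvCand, hp, pvIdx]

-- scan found a candidate for the head language ⇒ it is the rank-0 minimum
theorem pvS1 (l : Option String) (ls : List (Option String)) (imgs : List (List (String × Option String))) (p : String)
    (h : pvScanA l imgs = some p) : pvMin (l :: ls) imgs = some (0, p) := by
  induction imgs with
  | nil => simp [pvScanA] at h
  | cons i t ih =>
    simp only [pvScanA] at h
    simp only [pvMin]
    by_cases hiso : pvGet i "iso_639_1" = l
    · rw [if_pos hiso] at h
      by_cases htr : pvTruthy (pvGet i "file_path") = true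
      · rw [if_pos htr] at h
        cases hp : pvGet i "file_path" with
        | none => rw [hp] at htr; simp [pvTruthy] at htr
        | some q =>
          rw [hp] at h htr
          simp only [pvTruthy] at htr
          have hqe : q ≠ "" := by simpa using htr
          obtain rfl := Option.some.inj h
          have hcand : pvCand (l :: ls) i = some (0, q) := by
            simp [pvCand, hp, hqe, pvIdx, hiso]
          rw [hcand]
          cases hm : pvMin (l :: ls) t with
          | none => rfl
          | some c =>
            have hn := pvMin_nonneg _ _ _ hm
            simp only [pvMerge]
            rw [if_neg (by omega)]
      · rw [if_neg htr] at h
        have hcand : pvCand (l :: ls) i = none := by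
          cases hp : pvGet i "file_path" with
          | none => simp [pvCand, hp]
          | some q =>
            rw [hp] at htr
            simp only [pvTruthy] at htr
            have hq0 : q = "" := by simpa using htr
            simp [pvCand, hp, hq0]
        rw [hcand, ih h, pvMerge_none_left]
    · rw [if_neg hiso] at h
      rw [ih h]
      cases hc : pvCand (l :: ls) i with
      | none => rw [pvMerge_none_left]
      | some c =>
        have hge : 1 ≤ c.1 := by
          cases hp : pvGet i "file_path" with
          | none => simp only [pvCand, hp] at hc; cases hc
          | some q =>
            cases hr : pvIdx (pvGet i "iso_639_1") (l :: ls) with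
            | none => simp [pvCand, hp, hr] at hc
            | some r =>
              simp only [pvCand, hp, hr, Option.map_some] at hc
              by_cases hpe : q = ""
              · simp [hpe] at hc
              · rw [if_neg hpe] at hc
                obtain rfl := Option.some.inj hc
                simp only [pvIdx, if_neg hiso] at hr
                cases hr2 : pvIdx (pvGet i "iso_639_1") ls with
                | none => rw [hr2] at hr; cases hr
                | some r' =>
                  rw [hr2] at hr
                  simp only [Option.map_some] at hr
                  obtain rfl := Option.some.inj hr
                  have := pvIdx_nonneg _ _ _ hr2
                  simp only []
                  omega
        simp only [pvMerge]
        rw [if_pos (by omega)]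

-- no candidate for the head language ⇒ the minimum is the tail languages' minimum, shifted
theorem pvS2 (l : Option String) (ls : List (Option String)) (imgs : List (List (String × Option String)))
    (h : pvScanA l imgs = none) :
    pvMin (l :: ls) imgs = (pvMin ls imgs).map (fun c => (c.1 + 1, c.2)) := by
  induction imgs with
  | nil => rfl
  | cons i t ih =>
    simp only [pvScanA] at h
    have hshift : pvCand (l :: ls) i = (pvCand ls i).map (fun c => (c.1 + 1, c.2)) ∧ pvScanA l t = none := by
      by_cases hiso : pvGet i "iso_639_1" = l
      · rw [if_pos hiso] at h
        by_cases htr : pvTruthy (pvGet i "file_path") = true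
        · rw [if_pos htr] at h
          cases hp : pvGet i "file_path" with
          | none => rw [hp] at htr; simp [pvTruthy] at htr
          | some q => rw [hp] at h; simp at h
        · rw [if_neg htr] at h
          refine ⟨?_, h⟩
          cases hp : pvGet i "file_path" with
          | none => simp [pvCand, hp]
          | some q =>
            rw [hp] at htr
            simp only [pvTruthy] at htr
            have hq0 : q = "" := by simpa using htr
            simp [pvCand, hp, hq0]
      · rw [if_neg hiso] at h
        refine ⟨?_, h⟩
        cases hp : pvGet i "file_path" with
        | none => simp [pvCand, hp]
        | some q =>
          by_cases hpe : q = ""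
          · simp [pvCand, hp, hpe]
          · simp only [pvCand, hp, if_neg hpe, pvIdx, if_neg hiso]
            cases pvIdx (pvGet i "iso_639_1") ls <;> simp
    rcases hshift with ⟨hc, ht⟩
    simp only [pvMin, hc, ih ht]
    rcases pvCand ls i with _|c1 <;> rcases pvMin ls t with _|c2 <;>
      simp only [Option.map_none, Option.map_some, pvMerge_none_left, pvMerge_none_right]
    by_cases hlt : c2.1 < c1.1 <;>
      simp [pvMerge, hlt]

theorem pvMain (langs : List (Option String)) (imgs : List (List (String × Option String))) :
    pvLoopA langs imgs = (pvMin langs imgs).map Prod.snd := by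
  induction langs with
  | nil => simp [pvLoopA, pvMin_nil_langs]
  | cons l ls ih =>
    simp only [pvLoopA]
    cases hs : pvScanA l imgs with
    | some p => rw [pvS1 l ls imgs p hs]; rfl
    | none =>
      rw [pvS2 l ls imgs hs, ih]
      cases pvMin ls imgs <;> rfl

-- ===== VERDICT (by name: the statement is the Claim_ definition above) =====
theorem pick_image_by_language_py_spec : Claim_equal_pick_image_by_language_py := by
  intro images_list langs _
  unfold Spec_pick_image_by_language_py pick_image_by_language_py pick_image_by_language_py_alt
  cases images_list with
  | none => rfl
  | some imgs =>
    cases imgs with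
    | nil => rfl
    | cons i0 rest =>
      have hfold :
          (pvRunB (pvRankTable langs) (none, none) (i0 :: rest)).2
            = (pvMin langs (i0 :: rest)).map Prod.snd := by
        have h0 : ((none, none) : Option Int × Option String) = pvToPair none := rfl
        rw [h0, pvRun_toPair, pvMerge_none_left]
        rfl
      simp only [hfold, ← pvMain]
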